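-- pv_equiv track=rewrite | github.com/vroque19/aoc-2023 | day1/main.py | part1
-- ===== SOURCE A (Python) =====
-- def part1(line):
--     curr = ""
--     nums = ""
--     for c in line:
--         curr += c
--         if c.isdigit():
--             nums += c
--             curr = ""
--     if len(nums) == 1:
--         nums = nums*2
--     n = len(nums)
--     curr = ""
--     curr += str(nums[0])
--     curr += str(nums[n-1])
--     return int(curr)
-- ===== SOURCE B (Python) =====
-- def part1(line):
--     first = None
--     for c in line:
--         if c.isdigit():
--             first = c
--             break
--     last = None
--     for c in reversed(line):
--         if c.isdigit():
--             last = c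
--             break
--     return int(first + last)
-- ===== Notes on version B (the rewrite author's own statement) =====
-- stated objective: simpler
-- what changed: B scans the line once from the front for the first digit and once from the back for the last digit with early exit, then parses the two characters directly, instead of accumulating every digit into a string, doubling singletons and indexing into that string.
import Mathlib
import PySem

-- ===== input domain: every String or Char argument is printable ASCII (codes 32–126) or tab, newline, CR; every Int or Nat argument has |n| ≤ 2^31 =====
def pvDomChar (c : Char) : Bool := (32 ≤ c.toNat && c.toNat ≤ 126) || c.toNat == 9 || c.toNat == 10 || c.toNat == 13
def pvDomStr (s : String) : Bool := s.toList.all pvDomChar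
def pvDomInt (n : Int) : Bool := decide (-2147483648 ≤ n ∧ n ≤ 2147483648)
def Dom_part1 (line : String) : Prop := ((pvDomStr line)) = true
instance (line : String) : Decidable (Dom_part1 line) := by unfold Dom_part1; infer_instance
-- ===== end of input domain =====

-- B replaces A's digit-string accumulation + singleton doubling + string indexing with two
-- early-exit scans (front for the first digit, back for the last), then parses the pair.

-- ===== PORT A =====
def part1 (line : String) : Int :=
  -- for c in line: curr += c; if c.isdigit(): nums += c; curr = ""
  let st := line.toList.foldl
    (fun (st : List Char × List Char) c =>
      let curr := st.1 ++ [c]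
      if PySem.Chars.isdigit c then (([] : List Char), st.2 ++ [c]) else (curr, st.2))
    ([], [])
  -- if len(nums) == 1: nums = nums*2
  let nums := if st.2.length == 1 then st.2 ++ st.2 else st.2
  let n : Int := nums.length
  -- curr = "" + str(nums[0]) + str(nums[n-1]); nums[0] on "" raises IndexError (outside Pre_)
  let curr := ([] : List Char) ++ ((PySem.List.pyGet? nums 0).map (fun c => [c])).getD []
  let curr := curr ++ ((PySem.List.pyGet? nums (n - 1)).map (fun c => [c])).getD []
  (PySem.Int.ofChars? curr).getD 0

-- ===== PORT B =====
def part1_alt (line : String) : Int :=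
  match line.toList.find? PySem.Chars.isdigit, line.toList.reverse.find? PySem.Chars.isdigit with
  | some a, some b => (PySem.Int.ofChars? [a, b]).getD 0  -- int(first + last)
  | _, _ => 0  -- no digit: Python B raises here, outside Pre_

-- ===== PRECONDITION & SPEC =====
-- Pre_ excludes exactly the lines with no digit, on which A raises IndexError (and B TypeError).
def Pre_part1 (line : String) : Prop := line.toList.any PySem.Chars.isdigit = true
instance (line : String) : Decidable (Pre_part1 line) := by unfold Pre_part1; infer_instance
def pvWitness_part1 : String := "a1b2c3"
def Spec_part1 (line : String) (out : Int) : Prop := out = part1_alt line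
instance (line : String) (out : Int) : Decidable (Spec_part1 line out) := by unfold Spec_part1; infer_instance

-- ===== CLAIM (what is proved, stated in full; the proofs are below) =====
def Claim_equal_part1 : Prop := ∀ (line : String), Dom_part1 line → Pre_part1 line → Spec_part1 line (part1 line)

-- ===== LEMMAS AND PROOFS =====

theorem foldA (l : List Char) : ∀ (curr nums : List Char),
    (l.foldl (fun (st : List Char × List Char) c =>
      let curr := st.1 ++ [c]
      if PySem.Chars.isdigit c then (([] : List Char), st.2 ++ [c]) else (curr, st.2))
      (curr, nums)).2 = nums ++ l.filter PySem.Chars.isdigit := by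
  induction l with
  | nil => intro curr nums; simp
  | cons c l ih =>
      intro curr nums
      by_cases h : PySem.Chars.isdigit c = true <;>
        simp [List.foldl_cons, h, ih]

theorem find?_eq_head?_filter (p : Char → Bool) (l : List Char) :
    l.find? p = (l.filter p).head? := by
  induction l with
  | nil => simp
  | cons c l ih =>
      by_cases h : p c = true
      · rw [List.find?_cons_of_pos h, List.filter_cons_of_pos h, List.head?_cons]
      · rw [List.find?_cons_of_neg h, List.filter_cons_of_neg h, ih]

-- ===== VERDICT (by name: the statement is the Claim_ definition above) =====
theorem part1_spec : Claim_equal_part1 := by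
  intro line _ hpre
  unfold Spec_part1 part1 part1_alt
  dsimp only
  set l := line.toList with hl
  set d := l.filter PySem.Chars.isdigit with hd
  have hdne : d ≠ [] := by
    unfold Pre_part1 at hpre
    rw [List.any_eq_true] at hpre
    obtain ⟨c, hc, hpc⟩ := hpre
    exact List.ne_nil_of_mem (List.mem_filter.mpr ⟨hc, hpc⟩)
  have hfold := foldA l [] []
  simp only [List.nil_append] at hfold
  rw [hfold]
  have hfind1 : l.find? PySem.Chars.isdigit = (l.filter PySem.Chars.isdigit).head? :=
    find?_eq_head?_filter _ _
  have hfind2 : l.reverse.find? PySem.Chars.isdigit = d.getLast? := by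
    rw [find?_eq_head?_filter, List.filter_reverse, List.head?_reverse, hd]
  obtain ⟨a, ta, hda⟩ := List.exists_cons_of_ne_nil hdne
  have hhead : d.head? = some a := by rw [hda]; rfl
  have hlast : ∃ b, d.getLast? = some b := by
    rw [hda]; exact ⟨(a :: ta).getLast (by simp), List.getLast?_eq_some_getLast _⟩
  obtain ⟨b, hb⟩ := hlast
  rw [hfind1, ← hd, hhead, hfind2, hb]
  by_cases h1 : d.length = 1
  · -- d = [a], so b = a, nums = [a,a]
    have hda1 : d = [a] := by
      rw [hda] at h1 ⊢
      simp at h1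
      simp [h1]
    have hba : b = a := by
      rw [hda1] at hb; simpa using hb.symm
    rw [hda1, hba]
    simp [PySem.List.pyGet?, PySem.List.pyIdx?]
  · -- nums = d, length ≥ 2
    have h2 : 2 ≤ d.length := by
      have := List.length_pos_of_ne_nil hdne; omega
    have hlen : (d.length == 1) = false := by simp; omega
    rw [hlen]
    simp only [if_false, Bool.false_eq_true]
    have hg0 : PySem.List.pyGet? d 0 = some a := by
      have h0 : PySem.List.pyGet? d ((0 : Nat) : Int) = d[(0:Nat)]? := PySem.List.pyGet?_natCast d 0
      rw [show ((0:Nat):Int) = 0 from rfl] at h0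
      rw [h0, ← List.head?_eq_getElem?]
      exact hhead
    have hgl : PySem.List.pyGet? d ((d.length : Int) - 1) = some b := by
      have hcast : ((d.length : Int) - 1) = ((d.length - 1 : Nat) : Int) := by
        have := List.length_pos_of_ne_nil hdne; push_cast [Nat.cast_sub (by omega : 1 ≤ d.length)]; ring
      rw [hcast, PySem.List.pyGet?_natCast, ← List.getLast?_eq_getElem?, hb]
    rw [hg0, hgl]
    simp
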